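-- pv_equiv track=rewrite | github.com/eunomia-bpf/ebpf-verifier-agent | interface/extractor/engine/control_dep.py | _reverse_postorder
-- ===== SOURCE A (Python) =====
-- def _reverse_postorder(succ: dict[int, set[int]], entry: int) -> list[int]:
--     """Return nodes in reverse post-order (RPO) from *entry* in the graph
--     given by *succ*.
--
--     RPO is the order used by the iterative dominator algorithm: each node
--     appears after all its dominator-relevant predecessors.
--     """
--     visited: set[int] = set()
--     postorder: list[int] = []
--
--     # Iterative DFS.
--     stack: list[tuple[int, bool]] = [(entry, False)]
--     while stack:
--         node, returning = stack.pop()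
--         if returning:
--             postorder.append(node)
--             continue
--         if node in visited:
--             continue
--         visited.add(node)
--         stack.append((node, True))
--         for child in sorted(succ.get(node, set()), reverse=True):
--             if child not in visited:
--                 stack.append((child, False))
--
--     postorder.reverse()  # RPO = reverse of post-order
--     return postorder
-- ===== SOURCE B (Python) =====
-- def _reverse_postorder(succ: dict[int, set[int]], entry: int) -> list[int]:
--     """Return nodes in reverse post-order (RPO) from *entry* in the graph
--     given by *succ*.
--
--     Iterative DFS over one frame per discovered node: each frame keeps the
--     node and an iterator over its ascending-sorted successors; a node is
--     marked visited when discovered (pushed), and emitted to the post-order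
--     once its iterator is exhausted.
--     """
--     visited = {entry}
--     postorder: list[int] = []
--     stack = [(entry, iter(sorted(succ.get(entry, set()))))]
--     while stack:
--         node, children = stack[-1]
--         child = next((c for c in children if c not in visited), None)
--         if child is None:
--             postorder.append(node)
--             stack.pop()
--         else:
--             visited.add(child)
--             stack.append((child, iter(sorted(succ.get(child, set())))))
--     postorder.reverse()
--     return postorder
-- ===== Notes on version B (the rewrite author's own statement) =====
-- stated objective: alternative
-- what changed: Replaces A's two-phase stack of (node, returning) flags with pre-filtered reverse-sorted bulk pushes and re-checks at pop by a single frame per discovered node holding an iterator over its ascending-sorted successors, marking nodes at discovery and emitting each node when its iterator is exhausted.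
import Mathlib
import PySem

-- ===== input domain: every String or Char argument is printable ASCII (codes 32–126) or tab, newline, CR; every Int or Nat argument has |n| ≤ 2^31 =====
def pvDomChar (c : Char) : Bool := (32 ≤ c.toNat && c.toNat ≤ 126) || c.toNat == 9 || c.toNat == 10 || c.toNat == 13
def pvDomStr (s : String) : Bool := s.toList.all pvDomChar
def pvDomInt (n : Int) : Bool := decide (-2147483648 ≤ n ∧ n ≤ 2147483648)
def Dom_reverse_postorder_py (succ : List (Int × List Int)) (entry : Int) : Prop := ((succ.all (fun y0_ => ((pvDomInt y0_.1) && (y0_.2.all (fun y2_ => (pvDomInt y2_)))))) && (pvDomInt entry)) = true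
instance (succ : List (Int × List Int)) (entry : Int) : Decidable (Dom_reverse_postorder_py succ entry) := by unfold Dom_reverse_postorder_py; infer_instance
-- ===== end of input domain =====

-- B replaces A's two-phase (node, returning) stack (bulk reverse-sorted pushes, re-check at pop)
-- by one frame per discovered node holding its pending ascending successors, marking nodes at
-- discovery time; same return value, objective: alternative decomposition (no speed claim).

-- ===== PORT A =====
-- Helpers both ports' termination arguments need: the finite universe of nodes a DFS from
-- `entry` can ever see, and the count of its not-yet-visited members (the loop measure).
def pvU (succ : List (Int × List Int)) (entry : Int) : List Int :=
  entry :: succ.flatMap (fun p => p.2)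

def pvRem (U : List Int) (v : PySem.Set Int) : Nat :=
  (U.filter (fun x => !(PySem.Set.contains v x))).length

theorem pvRem_add_lt (U : List Int) (v : PySem.Set Int) (node : Int)
    (hU : node ∈ U) (hv : ¬ (PySem.Set.contains v node = true)) :
    pvRem U (PySem.Set.add v node) < pvRem U v := by
  have himp : ∀ x, (!(PySem.Set.contains (PySem.Set.add v node) x)) = true →
      (!(PySem.Set.contains v x)) = true := by
    intro x hx
    simp only [Bool.not_eq_true'] at hx ⊢
    cases hc : PySem.Set.contains v x with
    | false => rfl
    | true =>
      exfalso
      have hmem : x ∈ PySem.Set.add v node := by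
        rw [PySem.Set.mem_add]
        exact Or.inl ((PySem.Set.contains_iff v x).1 hc)
      rw [(PySem.Set.contains_iff _ _).2 hmem] at hx
      cases hx
  unfold pvRem
  induction U with
  | nil => cases hU
  | cons a t ih =>
    rcases List.mem_cons.1 hU with heq | h
    · subst heq
      have hQ : (!(PySem.Set.contains v node)) = true := by
        simp only [Bool.not_eq_true']
        cases hc : PySem.Set.contains v node with
        | false => rfl
        | true => exact absurd hc hv
      have hP : (!(PySem.Set.contains (PySem.Set.add v node) node)) = false := by
        simp only [Bool.not_eq_false']
        rw [PySem.Set.contains_iff]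
        rw [PySem.Set.mem_add]
        exact Or.inr rfl
      have hle := (List.monotone_filter_right t himp).length_le
      rw [List.filter_cons, List.filter_cons, hP, hQ, if_neg Bool.false_ne_true, if_pos rfl]
      simp only [List.length_cons]
      omega
    · have hlt := ih h
      by_cases hPa : (!(PySem.Set.contains (PySem.Set.add v node) a)) = true
      · have hQa := himp a hPa
        rw [List.filter_cons, List.filter_cons, hPa, hQa, if_pos rfl, if_pos rfl]
        simp only [List.length_cons]
        omega
      · have hPa' : (!(PySem.Set.contains (PySem.Set.add v node) a)) = false := by
          cases hb : (!(PySem.Set.contains (PySem.Set.add v node) a)) with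
          | false => rfl
          | true => exact absurd hb hPa
        rw [List.filter_cons, List.filter_cons, hPa', if_neg Bool.false_ne_true]
        cases hQa : (!(PySem.Set.contains v a)) with
        | false => rw [if_neg Bool.false_ne_true]; exact hlt
        | true => rw [if_pos rfl]; simp only [List.length_cons]; omega

-- every dict value element lies in the universe (cited by both ports' stack invariants)
theorem pv_getD_mem_pvU (succ : List (Int × List Int)) (entry : Int) (n c : Int)
    (hc : c ∈ (PySem.Dict.mk succ).getD n []) : c ∈ pvU succ entry := by
  have key : ∀ (l : List (Int × List Int)), c ∈ (PySem.Dict.mk l).getD n [] → ∃ p ∈ l, c ∈ p.2 := by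
    intro l
    induction l with
    | nil => intro hc; simp [PySem.Dict.getD, PySem.Dict.get?] at hc
    | cons q t ih =>
      intro hc
      rw [PySem.Dict.getD_eq_get?_getD, PySem.Dict.get?_mk_cons] at hc
      by_cases hk : (q.1 == n) = true
      · simp only [hk, if_true, Option.getD_some] at hc
        exact ⟨q, List.mem_cons_self, hc⟩
      · simp only [hk] at hc
        obtain ⟨p, hp, hcp⟩ := ih (by rw [PySem.Dict.getD_eq_get?_getD]; exact hc)
        exact ⟨p, List.mem_cons_of_mem _ hp, hcp⟩
  obtain ⟨p, hp, hcp⟩ := key succ hc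
  unfold pvU
  exact List.mem_cons_of_mem _ (List.mem_flatMap.2 ⟨p, hp, hcp⟩)

-- shape of A's push loop (cited by port A and by the proofs below)
theorem pvFoldlPush_eq (v1 : PySem.Set Int) :
    ∀ (l : List Int) (base : List (Int × Bool)),
      l.foldl (fun s c => if !(PySem.Set.contains v1 c) then (c, false) :: s else s) base
        = ((l.reverse.filter (fun c => !(PySem.Set.contains v1 c))).map (fun c => (c, false))) ++ base := by
  intro l
  induction l with
  | nil => intro base; simp
  | cons c t ih =>
    intro base
    simp only [List.foldl_cons, List.reverse_cons, List.filter_append, List.map_append,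
      List.append_assoc]
    rw [ih]
    by_cases hm : c ∈ v1
    · simp [hm]
    · simp [hm]

-- the loop of A: explicit stack of (node, returning) frames, literal transliteration;
-- U/hsucc/hst only feed the termination measure (number of unvisited universe nodes)
def pvLoopA (succ : List (Int × List Int)) (U : List Int)
    (hsucc : ∀ n c, c ∈ (PySem.Dict.mk succ).getD n [] → c ∈ U)
    (visited : PySem.Set Int) (postorder : List Int) (stack : List (Int × Bool))
    (hst : ∀ x ∈ stack, x.1 ∈ U) : List Int :=
  match stack with
  | [] => postorder
  | (node, returning) :: rest =>
    if returning then
      pvLoopA succ U hsucc visited (postorder ++ [node]) rest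
        (fun x hx => hst x (List.mem_cons_of_mem _ hx))
    else if _h2 : PySem.Set.contains visited node then
      pvLoopA succ U hsucc visited postorder rest
        (fun x hx => hst x (List.mem_cons_of_mem _ hx))
    else
      pvLoopA succ U hsucc (PySem.Set.add visited node) postorder
        ((PySem.List.sorted ((PySem.Dict.mk succ).getD node []) (fun x => x) true).foldl
          (fun s c => if !(PySem.Set.contains (PySem.Set.add visited node) c) then (c, false) :: s else s)
          ((node, true) :: rest))
        (by
          intro x hx
          rw [pvFoldlPush_eq] at hx
          rcases List.mem_append.1 hx with hx | hx
          · obtain ⟨c, hc, rfl⟩ := List.mem_map.1 hx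
            have : c ∈ PySem.List.sorted ((PySem.Dict.mk succ).getD node []) (fun x => x) true := by
              exact List.mem_reverse.1 (List.mem_of_mem_filter hc)
            exact hsucc node c ((PySem.List.mem_sorted _ _ _ _).1 this)
          · rcases List.mem_cons.1 hx with rfl | hx
            · exact hst (node, returning) List.mem_cons_self
            · exact hst x (List.mem_cons_of_mem _ hx))
  termination_by (pvRem U visited, stack.length)
  decreasing_by
  · exact Prod.Lex.right _ (Nat.lt_succ_self _)
  · exact Prod.Lex.right _ (Nat.lt_succ_self _)
  · exact Prod.Lex.left _ _ (pvRem_add_lt U visited node (hst (node, returning) List.mem_cons_self) _h2)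

def reverse_postorder_py (succ : List (Int × List Int)) (entry : Int) : List Int :=
  (pvLoopA succ (pvU succ entry) (pv_getD_mem_pvU succ entry) PySem.Set.empty []
      [(entry, false)]
      (by intro x hx; rcases List.mem_cons.1 hx with rfl | hx
          · exact List.mem_cons_self
          · cases hx)).reverse

-- ===== PORT B =====
-- the loop of B: one frame per discovered node, (node, pending ascending successors);
-- the dropWhile step is Python's `next((c for c in children if c not in visited), None)`
def pvLoopB (succ : List (Int × List Int)) (U : List Int)
    (hsucc : ∀ n c, c ∈ (PySem.Dict.mk succ).getD n [] → c ∈ U)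
    (visited : PySem.Set Int) (postorder : List Int) (stack : List (Int × List Int))
    (hst : ∀ f ∈ stack, ∀ c ∈ f.2, c ∈ U) : List Int :=
  match stack with
  | [] => postorder
  | (node, children) :: rest =>
    match h : children.dropWhile (fun c => PySem.Set.contains visited c) with
    | [] =>
      pvLoopB succ U hsucc visited (postorder ++ [node]) rest
        (fun f hf => hst f (List.mem_cons_of_mem _ hf))
    | c :: cs =>
      pvLoopB succ U hsucc (PySem.Set.add visited c) postorder
        ((c, PySem.List.sorted ((PySem.Dict.mk succ).getD c []) (fun x => x) false) :: (node, cs) :: rest)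
        (by
          intro f hf
          rcases List.mem_cons.1 hf with rfl | hf
          · intro d hd
            exact hsucc c d ((PySem.List.mem_sorted _ _ _ _).1 hd)
          rcases List.mem_cons.1 hf with rfl | hf
          · intro d hd
            exact hst (node, children) List.mem_cons_self d
              ((children.dropWhile_sublist _).mem (h ▸ List.mem_cons_of_mem _ hd))
          · exact hst f (List.mem_cons_of_mem _ hf))
  termination_by (pvRem U visited, (stack.map (fun f => f.2.length)).sum + stack.length)
  decreasing_by
  · apply Prod.Lex.right
    have : (children.dropWhile (fun c => PySem.Set.contains visited c)).length ≤ children.length :=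
      (children.dropWhile_sublist _).length_le
    simp only [List.map_cons, List.sum_cons, List.length_cons]
    omega
  · apply Prod.Lex.left
    apply pvRem_add_lt
    · exact hst (node, children) List.mem_cons_self c
        ((children.dropWhile_sublist _).mem (h ▸ List.mem_cons_self))
    · have := List.head_dropWhile_not (fun c => PySem.Set.contains visited c) (l := children)
      rw [h] at this
      simpa using this (by simp)

def reverse_postorder_py_alt (succ : List (Int × List Int)) (entry : Int) : List Int :=
  (pvLoopB succ (pvU succ entry) (pv_getD_mem_pvU succ entry)
      (PySem.Set.ofList [entry]) []
      [(entry, PySem.List.sorted ((PySem.Dict.mk succ).getD entry []) (fun x => x) false)]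
      (by intro f hf; rcases List.mem_cons.1 hf with rfl | hf
          · intro d hd
            exact pv_getD_mem_pvU succ entry entry d ((PySem.List.mem_sorted _ _ _ _).1 hd)
          · cases hf)).reverse

-- ===== PRECONDITION & SPEC =====
def Spec_reverse_postorder_py (succ : List (Int × List Int)) (entry : Int) (out : List Int) : Prop := out = reverse_postorder_py_alt succ entry
instance (succ : List (Int × List Int)) (entry : Int) (out : List Int) : Decidable (Spec_reverse_postorder_py succ entry out) := by unfold Spec_reverse_postorder_py; infer_instance

-- ===== CLAIM (what is proved, stated in full; the proofs are below) =====
def Claim_equal_reverse_postorder_py : Prop := ∀ (succ : List (Int × List Int)) (entry : Int), Dom_reverse_postorder_py succ entry → Spec_reverse_postorder_py succ entry (reverse_postorder_py succ entry)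

-- ===== LEMMAS AND PROOFS =====

-- proof-side helpers: a recursive reference DFS both loops are proved to simulate
theorem pvRem_mono (U : List Int) (v v' : PySem.Set Int) (h : ∀ x ∈ v, x ∈ v') :
    pvRem U v' ≤ pvRem U v := by
  apply (List.monotone_filter_right U _).length_le
  intro x hx
  simp only [Bool.not_eq_true'] at hx ⊢
  cases hc : PySem.Set.contains v x with
  | false => rfl
  | true =>
    exfalso
    have := (PySem.Set.contains_iff _ _).2 (h x ((PySem.Set.contains_iff _ _).1 hc))
    rw [this] at hx
    cases hx

-- ascending children list of a node (B's sort; A's reverse-sorted push list reversed)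
def pvAsc (succ : List (Int × List Int)) (node : Int) : List Int :=
  PySem.List.sorted ((PySem.Dict.mk succ).getD node []) (fun x => x) false

theorem pvSortedRevAsc (xs : List Int) :
    (PySem.List.sorted xs (fun x => x) true).reverse = PySem.List.sorted xs (fun x => x) false := by
  refine (PySem.List.sorted_id_eq_of_perm_of_pairwise _ _ ?_ ?_).symm
  · exact (List.reverse_perm _).trans (PySem.List.sorted_perm _ _ _)
  · rw [List.pairwise_reverse]
    exact PySem.List.sorted_pairwise_rev xs (fun x => x)

mutual
def pvDfs (succ : List (Int × List Int)) (U : List Int)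
    (hsucc : ∀ n c, c ∈ (PySem.Dict.mk succ).getD n [] → c ∈ U)
    (node : Int) (hn : node ∈ U) (v : PySem.Set Int) (p : List Int) :
    {r : PySem.Set Int × List Int // ∀ x ∈ v, x ∈ r.1} :=
  if h : PySem.Set.contains v node = true then ⟨(v, p), fun x hx => hx⟩
  else
    match pvGo succ U hsucc (pvAsc succ node)
        (fun c hc => hsucc node c ((PySem.List.mem_sorted _ _ _ _).1 hc))
        (PySem.Set.add v node) p with
    | ⟨(v', p'), hm⟩ =>
      ⟨(v', p' ++ [node]), fun x hx => hm x ((PySem.Set.mem_add _ _ _).2 (Or.inl hx))⟩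
termination_by (pvRem U v, 0)
decreasing_by
  exact Prod.Lex.left _ _ (pvRem_add_lt U v node hn h)

def pvGo (succ : List (Int × List Int)) (U : List Int)
    (hsucc : ∀ n c, c ∈ (PySem.Dict.mk succ).getD n [] → c ∈ U)
    (cs : List Int) (hcs : ∀ c ∈ cs, c ∈ U) (v : PySem.Set Int) (p : List Int) :
    {r : PySem.Set Int × List Int // ∀ x ∈ v, x ∈ r.1} :=
  match cs with
  | [] => ⟨(v, p), fun x hx => hx⟩
  | c :: rest =>
    match pvDfs succ U hsucc c (hcs c List.mem_cons_self) v p with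
    | ⟨(v1, p1), hm1⟩ =>
      match pvGo succ U hsucc rest (fun d hd => hcs d (List.mem_cons_of_mem _ hd)) v1 p1 with
      | ⟨r, hm2⟩ => ⟨r, fun x hx => hm2 x (hm1 x hx)⟩
termination_by (pvRem U v, cs.length + 1)
decreasing_by
  · exact Prod.Lex.right _ (by simp)
  · rcases Nat.lt_or_ge (pvRem U v1) (pvRem U v) with hlt | hge
    · exact Prod.Lex.left _ _ hlt
    · have heq : pvRem U v1 = pvRem U v := Nat.le_antisymm (pvRem_mono U v v1 hm1) hge
      rw [heq]
      exact Prod.Lex.right _ (Nat.lt_succ_self _)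
end

-- one-step equations for the two loops (any stack-invariant proofs; proofs are irrelevant)
theorem pvLoopA_congr (succ U hsucc v p s1 s2 h1 h2) (hs : s1 = s2) :
    pvLoopA succ U hsucc v p s1 h1 = pvLoopA succ U hsucc v p s2 h2 := by
  subst hs; rfl

theorem pvLoopA_ret (succ U hsucc v p node stk hst hst') :
    pvLoopA succ U hsucc v p ((node, true) :: stk) hst
      = pvLoopA succ U hsucc v (p ++ [node]) stk hst' := by
  rw [pvLoopA]
  rw [if_pos rfl]

theorem pvLoopA_skip (succ U hsucc v p node stk hst hst')
    (h : PySem.Set.contains v node = true) :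
    pvLoopA succ U hsucc v p ((node, false) :: stk) hst
      = pvLoopA succ U hsucc v p stk hst' := by
  rw [pvLoopA]
  rw [if_neg Bool.false_ne_true, dif_pos h]

theorem pvLoopA_visit (succ U hsucc v p node stk hst hst')
    (h : PySem.Set.contains v node = false) :
    pvLoopA succ U hsucc v p ((node, false) :: stk) hst
      = pvLoopA succ U hsucc (PySem.Set.add v node) p
          ((((pvAsc succ node).filter
              (fun c => !(PySem.Set.contains (PySem.Set.add v node) c))).map (fun c => (c, false)))
            ++ (node, true) :: stk) hst' := by
  rw [pvLoopA]
  rw [if_neg Bool.false_ne_true, dif_neg (by rw [h]; exact Bool.false_ne_true)]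
  apply pvLoopA_congr
  rw [pvFoldlPush_eq]
  rw [pvSortedRevAsc]
  rfl

theorem pvLoopA_nil (succ U hsucc v p hst) :
    pvLoopA succ U hsucc v p [] hst = p := by
  rw [pvLoopA]

theorem pvLoopB_nil (succ U hsucc v p hst) :
    pvLoopB succ U hsucc v p [] hst = p := by
  rw [pvLoopB]

theorem pvLoopB_pop (succ U hsucc v p node children rest hst hst')
    (h : children.dropWhile (fun c => PySem.Set.contains v c) = []) :
    pvLoopB succ U hsucc v p ((node, children) :: rest) hst
      = pvLoopB succ U hsucc v (p ++ [node]) rest hst' := by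
  rw [pvLoopB]
  split
  · rfl
  · next c0 cs0 heq => rw [h] at heq; simp at heq

theorem pvLoopB_push (succ U hsucc v p node children c cs rest hst hst')
    (h : children.dropWhile (fun c => PySem.Set.contains v c) = c :: cs) :
    pvLoopB succ U hsucc v p ((node, children) :: rest) hst
      = pvLoopB succ U hsucc (PySem.Set.add v c) p
          ((c, pvAsc succ c) :: (node, cs) :: rest) hst' := by
  rw [pvLoopB]
  split
  · next heq => rw [h] at heq; simp at heq
  · next c0 cs0 heq =>
      rw [h] at heq
      injection heq with h1 h2
      subst h1; subst h2
      rfl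

-- value equations for the reference DFS
theorem pvDfs_skip (succ U hsucc node hn v p) (h : PySem.Set.contains v node = true) :
    (pvDfs succ U hsucc node hn v p).1 = (v, p) := by
  rw [pvDfs, dif_pos h]

theorem pvDfs_visit (succ U hsucc node hn v p)
    (H : ∀ c ∈ pvAsc succ node, c ∈ U)
    (h : PySem.Set.contains v node = false) :
    (pvDfs succ U hsucc node hn v p).1
      = ((pvGo succ U hsucc (pvAsc succ node) H (PySem.Set.add v node) p).1.1,
         (pvGo succ U hsucc (pvAsc succ node) H (PySem.Set.add v node) p).1.2 ++ [node]) := by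
  rw [pvDfs, dif_neg (by rw [h]; exact Bool.false_ne_true)]

theorem pvGo_nil (succ U hsucc hcs v p) :
    (pvGo succ U hsucc [] hcs v p).1 = (v, p) := by
  rw [pvGo]

theorem pvGo_cons (succ U hsucc c rest hcs v p)
    (H1 : c ∈ U) (H2 : ∀ d ∈ rest, d ∈ U) :
    (pvGo succ U hsucc (c :: rest) hcs v p).1
      = (pvGo succ U hsucc rest H2 (pvDfs succ U hsucc c H1 v p).1.1
          (pvDfs succ U hsucc c H1 v p).1.2).1 := by
  rw [pvGo]

theorem pvGo_congr (succ U hsucc cs1 cs2 hcs1 hcs2 v p) (h : cs1 = cs2) :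
    (pvGo succ U hsucc cs1 hcs1 v p).1 = (pvGo succ U hsucc cs2 hcs2 v p).1 := by
  subst h; rfl

theorem pvGo_allvis (succ U hsucc) : ∀ (cs : List Int) (hcs : ∀ c ∈ cs, c ∈ U)
    (v : PySem.Set Int) (p : List Int), (∀ c ∈ cs, PySem.Set.contains v c = true) →
    (pvGo succ U hsucc cs hcs v p).1 = (v, p) := by
  intro cs
  induction cs with
  | nil => intro hcs v p _; exact pvGo_nil succ U hsucc hcs v p
  | cons c rest ih =>
    intro hcs v p hall
    rw [pvGo_cons succ U hsucc c rest hcs v p (hcs c List.mem_cons_self)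
      (fun d hd => hcs d (List.mem_cons_of_mem _ hd))]
    rw [pvDfs_skip succ U hsucc c (hcs c List.mem_cons_self) v p
      (hall c List.mem_cons_self)]
    exact ih (fun d hd => hcs d (List.mem_cons_of_mem _ hd)) v p
      (fun d hd => hall d (List.mem_cons_of_mem _ hd))

theorem pvGo_prefix (succ U hsucc) : ∀ (pre l : List Int)
    (hcs : ∀ c ∈ pre ++ l, c ∈ U) (hcs2 : ∀ c ∈ l, c ∈ U)
    (v : PySem.Set Int) (p : List Int), (∀ c ∈ pre, PySem.Set.contains v c = true) →
    (pvGo succ U hsucc (pre ++ l) hcs v p).1 = (pvGo succ U hsucc l hcs2 v p).1 := by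
  intro pre
  induction pre with
  | nil => intro l hcs hcs2 v p _; rfl
  | cons a pre' ih =>
    intro l hcs hcs2 v p hall
    show (pvGo succ U hsucc (a :: (pre' ++ l)) hcs v p).1 = (pvGo succ U hsucc l hcs2 v p).1
    rw [pvGo_cons succ U hsucc a (pre' ++ l) hcs v p (hcs a List.mem_cons_self)
      (fun d hd => hcs d (List.mem_cons_of_mem _ hd))]
    rw [pvDfs_skip succ U hsucc a (hcs a List.mem_cons_self) v p
      (hall a List.mem_cons_self)]
    exact ih l (fun d hd => hcs d (List.mem_cons_of_mem _ hd)) hcs2 v p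
      (fun d hd => hall d (List.mem_cons_of_mem _ hd))

-- stack invariants for intermediate stacks of loop A
theorem pvStk (U : List Int) (l : List Int) (hl : ∀ c ∈ l, c ∈ U) (q : Int → Bool)
    (s : List (Int × Bool)) (hs : ∀ x ∈ s, x.1 ∈ U) :
    ∀ x ∈ ((l.filter q).map (fun c => (c, false))) ++ s, x.1 ∈ U := by
  intro x hx
  rcases List.mem_append.1 hx with hx | hx
  · obtain ⟨c, hcm, rfl⟩ := List.mem_map.1 hx
    exact hl c (List.mem_of_mem_filter hcm)
  · exact hs x hx

-- the two statements of the mutual simulation of loop A by the reference DFS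
def pvStmtDfs (succ : List (Int × List Int)) (U : List Int)
    (hsucc : ∀ n c, c ∈ (PySem.Dict.mk succ).getD n [] → c ∈ U) (m : Nat) : Prop :=
  ∀ (node : Int) (hn : node ∈ U) (v : PySem.Set Int) (p : List Int)
    (stk : List (Int × Bool)) (hst : ∀ x ∈ (node, false) :: stk, x.1 ∈ U)
    (hst' : ∀ x ∈ stk, x.1 ∈ U), pvRem U v ≤ m →
    pvLoopA succ U hsucc v p ((node, false) :: stk) hst
      = pvLoopA succ U hsucc (pvDfs succ U hsucc node hn v p).1.1
          (pvDfs succ U hsucc node hn v p).1.2 stk hst'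

def pvStmtGo (succ : List (Int × List Int)) (U : List Int)
    (hsucc : ∀ n c, c ∈ (PySem.Dict.mk succ).getD n [] → c ∈ U) (m : Nat) : Prop :=
  ∀ (cs : List Int) (hcs : ∀ c ∈ cs, c ∈ U) (v0 v : PySem.Set Int) (p : List Int)
    (stk : List (Int × Bool))
    (hst : ∀ x ∈ ((cs.filter (fun c => !(PySem.Set.contains v0 c))).map (fun c => (c, false))) ++ stk, x.1 ∈ U)
    (hst' : ∀ x ∈ stk, x.1 ∈ U), pvRem U v ≤ m → (∀ x ∈ v0, x ∈ v) →
    pvLoopA succ U hsucc v p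
        (((cs.filter (fun c => !(PySem.Set.contains v0 c))).map (fun c => (c, false))) ++ stk) hst
      = pvLoopA succ U hsucc (pvGo succ U hsucc cs hcs v p).1.1
          (pvGo succ U hsucc cs hcs v p).1.2 stk hst'

-- simulation of A's two-phase stack by the reference DFS
theorem pvSimA (succ : List (Int × List Int)) (U : List Int)
    (hsucc : ∀ n c, c ∈ (PySem.Dict.mk succ).getD n [] → c ∈ U) :
    ∀ (m : Nat), pvStmtDfs succ U hsucc m ∧ pvStmtGo succ U hsucc m := by
  intro m
  induction m using Nat.strong_induction_on with
  | _ m IH =>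
  have Hdfs : pvStmtDfs succ U hsucc m := by
    intro node hn v p stk hst hst' hm
    by_cases hc : PySem.Set.contains v node = true
    · rw [pvLoopA_skip succ U hsucc v p node stk hst hst' hc]
      rw [pvDfs_skip succ U hsucc node hn v p hc]
    · have hc' : PySem.Set.contains v node = false := by
        cases hb : PySem.Set.contains v node with
        | false => rfl
        | true => exact absurd hb hc
      have hlt : pvRem U (PySem.Set.add v node) < m :=
        lt_of_lt_of_le (pvRem_add_lt U v node hn hc) hm
      have hasc : ∀ c ∈ pvAsc succ node, c ∈ U :=
        fun c hcm => hsucc node c ((PySem.List.mem_sorted _ _ _ _).1 hcm)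
      have hstk1 : ∀ x ∈ (node, true) :: stk, x.1 ∈ U := by
        intro x hx
        rcases List.mem_cons.1 hx with rfl | hx
        · exact hn
        · exact hst' x hx
      have hstk2 := pvStk U (pvAsc succ node) hasc
        (fun c => !(PySem.Set.contains (PySem.Set.add v node) c)) ((node, true) :: stk) hstk1
      rw [pvLoopA_visit succ U hsucc v p node stk hst hstk2 hc']
      rw [(IH _ hlt).2 (pvAsc succ node) hasc (PySem.Set.add v node) (PySem.Set.add v node)
        p ((node, true) :: stk) hstk2 hstk1 (le_refl _) (fun x hx => hx)]
      rw [pvLoopA_ret succ U hsucc _ _ node stk hstk1 hst']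
      rw [pvDfs_visit succ U hsucc node hn v p hasc hc']
  refine ⟨Hdfs, ?_⟩
  intro cs
  induction cs with
  | nil =>
    intro hcs v0 v p stk hst hst' hm hv0
    rw [pvGo_nil succ U hsucc hcs v p]
    exact pvLoopA_congr succ U hsucc v p _ stk hst hst' (by simp)
  | cons c rest ihcs =>
    intro hcs v0 v p stk hst hst' hm hv0
    have hcU : c ∈ U := hcs c List.mem_cons_self
    have hrU : ∀ d ∈ rest, d ∈ U := fun d hd => hcs d (List.mem_cons_of_mem _ hd)
    by_cases hc0 : PySem.Set.contains v0 c = true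
    · -- child already visited at push time: it was filtered out of the push list
      have hcv : PySem.Set.contains v c = true :=
        (PySem.Set.contains_iff _ _).2 (hv0 c ((PySem.Set.contains_iff _ _).1 hc0))
      have hPc : (!(PySem.Set.contains v0 c)) = false := by rw [hc0]; rfl
      have hfc : (c :: rest).filter (fun d => !(PySem.Set.contains v0 d))
          = rest.filter (fun d => !(PySem.Set.contains v0 d)) := by
        rw [List.filter_cons, hPc, if_neg Bool.false_ne_true]
      have hst2 := pvStk U rest hrU (fun d => !(PySem.Set.contains v0 d)) stk hst'
      rw [pvLoopA_congr succ U hsucc v p _ _ hst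
        (pvStk U rest hrU (fun d => !(PySem.Set.contains v0 d)) stk hst')
        (by rw [hfc])]
      rw [ihcs hrU v0 v p stk hst2 hst' hm hv0]
      have hval : (pvGo succ U hsucc (c :: rest) hcs v p).1
          = (pvGo succ U hsucc rest hrU v p).1 := by
        rw [pvGo_cons succ U hsucc c rest hcs v p hcU hrU]
        rw [pvDfs_skip succ U hsucc c hcU v p hcv]
      rw [hval]
    · -- child pushed: one dfs step, then the rest of the children
      have hc0f : PySem.Set.contains v0 c = false := by
        cases hb : PySem.Set.contains v0 c with
        | false => rfl
        | true => exact absurd hb hc0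
      have hPc : (!(PySem.Set.contains v0 c)) = true := by rw [hc0f]; rfl
      have hfc : (c :: rest).filter (fun d => !(PySem.Set.contains v0 d))
          = c :: rest.filter (fun d => !(PySem.Set.contains v0 d)) := by
        rw [List.filter_cons, hPc, if_pos rfl]
      have hstRest := pvStk U rest hrU (fun d => !(PySem.Set.contains v0 d)) stk hst'
      have hstC : ∀ x ∈ (c, false) ::
          ((rest.filter (fun d => !(PySem.Set.contains v0 d))).map (fun d => (d, false)) ++ stk),
          x.1 ∈ U := by
        intro x hx
        rcases List.mem_cons.1 hx with rfl | hx
        · exact hcU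
        · exact hstRest x hx
      rw [pvLoopA_congr succ U hsucc v p _ _ hst hstC (by rw [hfc]; rfl)]
      rw [Hdfs c hcU v p _ hstC hstRest hm]
      have hmono := (pvDfs succ U hsucc c hcU v p).2
      rw [ihcs hrU v0 (pvDfs succ U hsucc c hcU v p).1.1 (pvDfs succ U hsucc c hcU v p).1.2
        stk hstRest hst' (le_trans (pvRem_mono U v _ hmono) hm)
        (fun x hx => hmono x (hv0 x hx))]
      have hval : (pvGo succ U hsucc (c :: rest) hcs v p).1
          = (pvGo succ U hsucc rest hrU (pvDfs succ U hsucc c hcU v p).1.1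
              (pvDfs succ U hsucc c hcU v p).1.2).1 :=
        pvGo_cons succ U hsucc c rest hcs v p hcU hrU
      rw [hval]

-- simulation of B's pending-children stack by the reference DFS
theorem pvSimB (succ : List (Int × List Int)) (U : List Int)
    (hsucc : ∀ n c, c ∈ (PySem.Dict.mk succ).getD n [] → c ∈ U) : ∀ (m : Nat),
    ∀ (node : Int) (children : List Int) (hch : ∀ c ∈ children, c ∈ U)
      (v : PySem.Set Int) (p : List Int) (rest : List (Int × List Int))
      (hst : ∀ f ∈ (node, children) :: rest, ∀ c ∈ f.2, c ∈ U)
      (hst' : ∀ f ∈ rest, ∀ c ∈ f.2, c ∈ U), pvRem U v ≤ m →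
    pvLoopB succ U hsucc v p ((node, children) :: rest) hst
      = pvLoopB succ U hsucc (pvGo succ U hsucc children hch v p).1.1
          ((pvGo succ U hsucc children hch v p).1.2 ++ [node]) rest hst' := by
  intro m
  induction m using Nat.strong_induction_on with
  | _ m IH =>
  intro node children hch v p rest hst hst' hm
  cases hdw : children.dropWhile (fun c => PySem.Set.contains v c) with
  | nil =>
    have hall : ∀ c ∈ children, PySem.Set.contains v c = true := by
      intro c hcm
      exact List.dropWhile_eq_nil_iff.1 hdw c hcm
    rw [pvLoopB_pop succ U hsucc v p node children rest hst hst' hdw]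
    rw [pvGo_allvis succ U hsucc children hch v p hall]
  | cons c cs =>
    have hsubl : (c :: cs).Sublist children := hdw ▸ children.dropWhile_sublist _
    have hcU : c ∈ U := hch c (hsubl.mem List.mem_cons_self)
    have hcsU : ∀ d ∈ cs, d ∈ U := fun d hd => hch d (hsubl.mem (List.mem_cons_of_mem _ hd))
    have hcvf : PySem.Set.contains v c = false := by
      have := List.head_dropWhile_not (fun c => PySem.Set.contains v c) (l := children)
      rw [hdw] at this
      simpa using this (by simp)
    have hasc : ∀ d ∈ pvAsc succ c, d ∈ U :=
      fun d hdm => hsucc c d ((PySem.List.mem_sorted _ _ _ _).1 hdm)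
    have hstPush : ∀ f ∈ (c, pvAsc succ c) :: (node, cs) :: rest, ∀ d ∈ f.2, d ∈ U := by
      intro f hf
      rcases List.mem_cons.1 hf with rfl | hf
      · exact hasc
      rcases List.mem_cons.1 hf with rfl | hf
      · exact hcsU
      · exact hst' f hf
    have hstMid : ∀ f ∈ (node, cs) :: rest, ∀ d ∈ f.2, d ∈ U := by
      intro f hf
      rcases List.mem_cons.1 hf with rfl | hf
      · exact hcsU
      · exact hst' f hf
    rw [pvLoopB_push succ U hsucc v p node children c cs rest hst hstPush hdw]
    have hlt1 : pvRem U (PySem.Set.add v c) < m :=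
      lt_of_lt_of_le (pvRem_add_lt U v c hcU (by rw [hcvf]; exact Bool.false_ne_true)) hm
    rw [IH _ hlt1 c (pvAsc succ c) hasc (PySem.Set.add v c) p ((node, cs) :: rest)
      hstPush hstMid (le_refl _)]
    have hmono1 := (pvGo succ U hsucc (pvAsc succ c) hasc (PySem.Set.add v c) p).2
    have hlt2 : pvRem U (pvGo succ U hsucc (pvAsc succ c) hasc (PySem.Set.add v c) p).1.1 < m :=
      lt_of_le_of_lt (pvRem_mono U _ _ hmono1) hlt1
    rw [IH _ hlt2 node cs hcsU
      (pvGo succ U hsucc (pvAsc succ c) hasc (PySem.Set.add v c) p).1.1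
      ((pvGo succ U hsucc (pvAsc succ c) hasc (PySem.Set.add v c) p).1.2 ++ [c])
      rest hstMid hst' (le_refl _)]
    -- and the reference value on the full children list decomposes the same way
    have hpre : ∀ d ∈ children.takeWhile (fun c => PySem.Set.contains v c),
        PySem.Set.contains v d = true := by
      intro d hd
      exact List.mem_takeWhile_imp hd
    have hchTake : ∀ d ∈ children.takeWhile (fun c => PySem.Set.contains v c) ++ c :: cs, d ∈ U := by
      rw [show children.takeWhile (fun c => PySem.Set.contains v c) ++ c :: cs = children by
        rw [← hdw, List.takeWhile_append_dropWhile]]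
      exact hch
    have hccsU : ∀ d ∈ c :: cs, d ∈ U := by
      intro d hd
      rcases List.mem_cons.1 hd with rfl | hd
      · exact hcU
      · exact hcsU d hd
    have hval : (pvGo succ U hsucc children hch v p).1
        = (pvGo succ U hsucc cs hcsU
            (pvGo succ U hsucc (pvAsc succ c) hasc (PySem.Set.add v c) p).1.1
            ((pvGo succ U hsucc (pvAsc succ c) hasc (PySem.Set.add v c) p).1.2 ++ [c])).1 := by
      rw [pvGo_congr succ U hsucc children
        (children.takeWhile (fun c => PySem.Set.contains v c) ++ c :: cs) hch hchTake v p
        (by rw [← hdw, List.takeWhile_append_dropWhile])]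
      rw [pvGo_prefix succ U hsucc (children.takeWhile (fun c => PySem.Set.contains v c))
        (c :: cs) hchTake hccsU v p hpre]
      rw [pvGo_cons succ U hsucc c cs hccsU v p hcU hcsU]
      rw [pvDfs_visit succ U hsucc c hcU v p hasc hcvf]
    rw [hval]

-- ===== VERDICT (by name: the statement is the Claim_ definition above) =====
theorem reverse_postorder_py_spec : Claim_equal_reverse_postorder_py := by
  unfold Claim_equal_reverse_postorder_py
  intro succ entry _hdom
  unfold Spec_reverse_postorder_py
  unfold reverse_postorder_py reverse_postorder_py_alt
  have hentry : entry ∈ pvU succ entry := List.mem_cons_self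
  have hasc : ∀ d ∈ PySem.List.sorted ((PySem.Dict.mk succ).getD entry []) (fun x => x) false,
      d ∈ pvU succ entry :=
    fun d hdm => pv_getD_mem_pvU succ entry entry d ((PySem.List.mem_sorted _ _ _ _).1 hdm)
  have hnil : ∀ x ∈ ([] : List (Int × Bool)), x.1 ∈ pvU succ entry := by intro x hx; cases hx
  have hnilB : ∀ f ∈ ([] : List (Int × List Int)), ∀ c ∈ f.2, c ∈ pvU succ entry := by
    intro f hf; cases hf
  have hA := (pvSimA succ (pvU succ entry) (pv_getD_mem_pvU succ entry)
      (pvRem (pvU succ entry) PySem.Set.empty)).1 entry hentry PySem.Set.empty [] []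
      (by intro x hx
          rcases List.mem_cons.1 hx with rfl | hx
          · exact hentry
          · cases hx)
      hnil (le_refl _)
  rw [hA]
  rw [pvLoopA_nil]
  have hB := pvSimB succ (pvU succ entry) (pv_getD_mem_pvU succ entry)
      (pvRem (pvU succ entry) (PySem.Set.ofList [entry])) entry
      (PySem.List.sorted ((PySem.Dict.mk succ).getD entry []) (fun x => x) false) hasc
      (PySem.Set.ofList [entry]) [] []
      (by intro f hf
          rcases List.mem_cons.1 hf with rfl | hf
          · exact hasc
          · cases hf)
      hnilB (le_refl _)
  rw [hB]
  rw [pvLoopB_nil]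
  rw [pvDfs_visit succ (pvU succ entry) (pv_getD_mem_pvU succ entry) entry hentry
    PySem.Set.empty [] hasc rfl]
  rfl
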